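-- pv_equiv track=rewrite | github.com/Ahmi225/survillience | main.py | _get_enhanced_system_state
-- ===== SOURCE A (Python) =====
-- from typing import Dict, List, Any, Optional, Tuple
--
-- def _get_enhanced_system_state(detections: List[Dict[str, Any]]) -> str:
--     """Get enhanced system state"""
--     if not detections:
--         return "NORMAL"
--
--     has_weapon = False
--     has_aiming = False
--     has_hands_up = False
--
--     for detection in detections:
--         class_name = detection.get("meta", {}).get("class_name", "").upper()
--         activity = detection.get("meta", {}).get("activity", "Unknown")
--
--         if class_name in ["GUN", "KNIFE", "WEAPON"]:
--             has_weapon = True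
--
--         if activity.upper() in ["AIMING", "HANDSUP"]:
--             if activity.upper() == "AIMING":
--                 has_aiming = True
--             elif activity.upper() == "HANDSUP":
--                 has_hands_up = True
--
--     if has_weapon and (has_aiming or has_hands_up):
--         return "EMERGENCY"
--     elif has_weapon:
--         return "WEAPON_DETECTED"
--     elif has_aiming or has_hands_up:
--         return "SUSPICIOUS"
--     else:
--         return "NORMAL"
-- ===== SOURCE B (Python) =====
-- from typing import Dict, List, Any
--
-- def _get_enhanced_system_state(detections: List[Dict[str, Any]]) -> str:
--     """Get enhanced system state (three independent scans instead of one flag loop)"""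
--     has_weapon = any(
--         d.get("meta", {}).get("class_name", "").upper() in ("GUN", "KNIFE", "WEAPON")
--         for d in detections)
--     has_aiming = any(
--         d.get("meta", {}).get("activity", "Unknown").upper() == "AIMING"
--         for d in detections)
--     has_hands_up = any(
--         d.get("meta", {}).get("activity", "Unknown").upper() == "HANDSUP"
--         for d in detections)
--
--     if has_weapon and (has_aiming or has_hands_up):
--         return "EMERGENCY"
--     if has_weapon:
--         return "WEAPON_DETECTED"
--     if has_aiming or has_hands_up:
--         return "SUSPICIOUS"
--     return "NORMAL"
-- ===== Notes on version B (the rewrite author's own statement) =====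
-- stated objective: simpler
-- what changed: Replaces the single loop that accumulates three mutable flags (with a nested membership test plus if/elif on the activity) by three independent any() scans, one per flag, and drops the redundant empty-list early return; the final if-chain is unchanged.
import Mathlib
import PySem

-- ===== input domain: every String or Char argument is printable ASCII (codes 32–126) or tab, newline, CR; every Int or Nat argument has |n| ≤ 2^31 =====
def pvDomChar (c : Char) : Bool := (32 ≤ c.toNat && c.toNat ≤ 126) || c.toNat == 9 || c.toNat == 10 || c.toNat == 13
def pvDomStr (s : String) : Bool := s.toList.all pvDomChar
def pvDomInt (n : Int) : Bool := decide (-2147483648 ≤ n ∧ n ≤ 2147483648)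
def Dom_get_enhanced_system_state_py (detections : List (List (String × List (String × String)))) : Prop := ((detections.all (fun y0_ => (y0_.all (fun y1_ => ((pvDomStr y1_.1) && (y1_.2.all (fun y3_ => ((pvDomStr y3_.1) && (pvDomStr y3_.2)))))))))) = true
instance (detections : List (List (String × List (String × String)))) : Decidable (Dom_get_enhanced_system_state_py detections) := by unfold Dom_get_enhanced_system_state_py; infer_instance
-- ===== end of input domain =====

-- B replaces A's single flag-accumulating loop by three independent any-scans (one per flag), keeping the same final if-chain; objective: simpler.


-- ===== PORT A =====
def get_enhanced_system_state_py (detections : List (List (String × List (String × String)))) : String :=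
  if detections = [] then "NORMAL"
  else
    let st := detections.foldl (fun (s : Bool × Bool × Bool) detection =>
      let class_name := PySem.Str.upper ((PySem.Dict.mk ((PySem.Dict.mk detection).getD "meta" [])).getD "class_name" "")
      let activity := (PySem.Dict.mk ((PySem.Dict.mk detection).getD "meta" [])).getD "activity" "Unknown"
      let w := if class_name ∈ ["GUN", "KNIFE", "WEAPON"] then true else s.1
      let ah : Bool × Bool :=
        if PySem.Str.upper activity ∈ ["AIMING", "HANDSUP"] then
          if PySem.Str.upper activity = "AIMING" then (true, s.2.2)
          else if PySem.Str.upper activity = "HANDSUP" then (s.2.1, true)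
          else (s.2.1, s.2.2)
        else (s.2.1, s.2.2)
      (w, ah.1, ah.2)) (false, false, false)
    if st.1 && (st.2.1 || st.2.2) then "EMERGENCY"
    else if st.1 then "WEAPON_DETECTED"
    else if st.2.1 || st.2.2 then "SUSPICIOUS"
    else "NORMAL"

-- ===== PORT B =====
def get_enhanced_system_state_py_alt (detections : List (List (String × List (String × String)))) : String :=
  let has_weapon := detections.any (fun d =>
    decide (PySem.Str.upper ((PySem.Dict.mk ((PySem.Dict.mk d).getD "meta" [])).getD "class_name" "") ∈ ["GUN", "KNIFE", "WEAPON"]))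
  let has_aiming := detections.any (fun d =>
    decide (PySem.Str.upper ((PySem.Dict.mk ((PySem.Dict.mk d).getD "meta" [])).getD "activity" "Unknown") = "AIMING"))
  let has_hands_up := detections.any (fun d =>
    decide (PySem.Str.upper ((PySem.Dict.mk ((PySem.Dict.mk d).getD "meta" [])).getD "activity" "Unknown") = "HANDSUP"))
  if has_weapon && (has_aiming || has_hands_up) then "EMERGENCY"
  else if has_weapon then "WEAPON_DETECTED"
  else if has_aiming || has_hands_up then "SUSPICIOUS"
  else "NORMAL"

-- ===== PRECONDITION & SPEC =====
def Spec_get_enhanced_system_state_py (detections : List (List (String × List (String × String)))) (out : String) : Prop := out = get_enhanced_system_state_py_alt detections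
instance (detections : List (List (String × List (String × String)))) (out : String) : Decidable (Spec_get_enhanced_system_state_py detections out) := by unfold Spec_get_enhanced_system_state_py; infer_instance

-- ===== CLAIM (what is proved, stated in full; the proofs are below) =====
def Claim_equal_get_enhanced_system_state_py : Prop := ∀ (detections : List (List (String × List (String × String)))), Dom_get_enhanced_system_state_py detections → Spec_get_enhanced_system_state_py detections (get_enhanced_system_state_py detections)

-- ===== LEMMAS AND PROOFS =====

def pvActOf (d : List (String × List (String × String))) : String :=
  PySem.Str.upper ((PySem.Dict.mk ((PySem.Dict.mk d).getD "meta" [])).getD "activity" "Unknown")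

def pvClsWeapon (d : List (String × List (String × String))) : Bool :=
  decide (PySem.Str.upper ((PySem.Dict.mk ((PySem.Dict.mk d).getD "meta" [])).getD "class_name" "") ∈ ["GUN", "KNIFE", "WEAPON"])

theorem pv_foldl_flags (l : List (List (String × List (String × String)))) (w a h : Bool) :
    l.foldl (fun (s : Bool × Bool × Bool) detection =>
      let class_name := PySem.Str.upper ((PySem.Dict.mk ((PySem.Dict.mk detection).getD "meta" [])).getD "class_name" "")
      let activity := (PySem.Dict.mk ((PySem.Dict.mk detection).getD "meta" [])).getD "activity" "Unknown"
      let w := if class_name ∈ ["GUN", "KNIFE", "WEAPON"] then true else s.1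
      let ah : Bool × Bool :=
        if PySem.Str.upper activity ∈ ["AIMING", "HANDSUP"] then
          if PySem.Str.upper activity = "AIMING" then (true, s.2.2)
          else if PySem.Str.upper activity = "HANDSUP" then (s.2.1, true)
          else (s.2.1, s.2.2)
        else (s.2.1, s.2.2)
      (w, ah.1, ah.2)) (w, a, h)
    = (w || l.any pvClsWeapon,
       a || l.any (fun d => decide (pvActOf d = "AIMING")),
       h || l.any (fun d => decide (pvActOf d = "HANDSUP"))) := by
  induction l generalizing w a h with
  | nil => simp
  | cons x xs ih =>
    simp only [List.foldl_cons, List.any_cons]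
    rw [ih]
    by_cases hA : pvActOf x = "AIMING" <;>
      by_cases hH : pvActOf x = "HANDSUP" <;>
      by_cases hW : PySem.Str.upper ((PySem.Dict.mk ((PySem.Dict.mk x).getD "meta" [])).getD "class_name" "") ∈ ["GUN", "KNIFE", "WEAPON"] <;>
      simp_all [pvActOf, pvClsWeapon, Bool.or_assoc]

-- ===== VERDICT (by name: the statement is the Claim_ definition above) =====
theorem get_enhanced_system_state_py_spec : Claim_equal_get_enhanced_system_state_py := by
  intro detections _
  unfold Spec_get_enhanced_system_state_py get_enhanced_system_state_py get_enhanced_system_state_py_alt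
  by_cases hnil : detections = []
  · subst hnil; simp
  · simp only [if_neg hnil, pv_foldl_flags, Bool.false_or]
    rfl
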